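-- pv_equiv track=rewrite | github.com/aaroJuu/anomaly_detection_in_people_flow | flowmap.py | angle_to_direction
-- ===== SOURCE A (Python) =====
-- def angle_to_direction(theta_degrees):
--     # Normalize to [0, 360)
--     angle = theta_degrees % 360
--     direction_vectors = {
--         'E':  (1, 0),
--         'NE': (1, 1),
--         'N':  (0, 1),
--         'NW': (-1, 1),
--         'W':  (-1, 0),
--         'SW': (-1, -1),
--         'S':  (0, -1),
--         'SE': (1, -1),
--     }
--     direction_bins = {
--         'E':   (337.5, 22.5),
--         'NE':  (22.5, 67.5),
--         'N':   (67.5, 112.5),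
--         'NW':  (112.5, 157.5),
--         'W':   (157.5, 202.5),
--         'SW':  (202.5, 247.5),
--         'S':   (247.5, 292.5),
--         'SE':  (292.5, 337.5),
--     }
--     for dir_label, (low, high) in direction_bins.items():
--         if low < high:
--             if low <= angle < high:
--                 return direction_vectors[dir_label]
--         else:  # Wraparound case for 'E'
--             if angle >= low or angle < high:
--                 return direction_vectors[dir_label]
--     return None
-- ===== SOURCE B (Python) =====
-- def angle_to_direction(theta_degrees):
--     # Arithmetic binning: one index computation instead of scanning 8 bins.
--     directions = [(1, 0), (1, 1), (0, 1), (-1, 1), (-1, 0), (-1, -1), (0, -1), (1, -1)]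
--     angle = theta_degrees % 360
--     idx = (2 * angle + 45) // 90 % 8
--     return directions[idx]
-- ===== Notes on version B (the rewrite author's own statement) =====
-- stated objective: simpler
-- what changed: Replaces the 8-bin dictionary scan with direct arithmetic indexing into an ordered list of direction vectors (idx = (2*angle+45)//90 % 8).
import Mathlib
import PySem

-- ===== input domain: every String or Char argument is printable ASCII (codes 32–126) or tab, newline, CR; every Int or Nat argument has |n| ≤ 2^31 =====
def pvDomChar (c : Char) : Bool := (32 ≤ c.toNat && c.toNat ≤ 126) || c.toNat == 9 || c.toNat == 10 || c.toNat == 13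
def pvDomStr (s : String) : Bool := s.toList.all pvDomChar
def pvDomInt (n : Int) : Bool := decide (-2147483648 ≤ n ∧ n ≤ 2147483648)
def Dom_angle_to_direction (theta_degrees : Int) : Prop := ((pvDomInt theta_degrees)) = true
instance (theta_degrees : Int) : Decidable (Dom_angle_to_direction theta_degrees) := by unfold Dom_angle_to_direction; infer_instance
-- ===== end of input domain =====

-- B replaces A's scan over 8 direction bins with direct arithmetic indexing into an
-- ordered list of direction vectors (simpler; no speed claim).

-- ===== PORT A =====
-- The Python bin bounds are half-integer floats (22.5, 67.5, …); the argument is an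
-- integer, so every comparison 'angle ⋈ x.5' is ported exactly as '2*angle ⋈ 2*x'
-- (hand port of the float comparisons; exact on integer angles).
def pvVectorsA : PySem.Dict String (Int × Int) :=
  PySem.Dict.ofList [("E", (1, 0)), ("NE", (1, 1)), ("N", (0, 1)), ("NW", (-1, 1)),
   ("W", (-1, 0)), ("SW", (-1, -1)), ("S", (0, -1)), ("SE", (1, -1))]

-- direction_bins with both bounds doubled (so they are integers)
def pvBinsA : List (String × Int × Int) :=
  [("E", 675, 45), ("NE", 45, 135), ("N", 135, 225), ("NW", 225, 315),
   ("W", 315, 405), ("SW", 405, 495), ("S", 495, 585), ("SE", 585, 675)]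

-- the for-loop with its early returns (angle doubled to match the doubled bounds)
def pvLoopA (angle2 : Int) : List (String × Int × Int) → Option (Int × Int)
  | [] => none
  | (dir_label, low, high) :: rest =>
    if low < high then
      if low ≤ angle2 ∧ angle2 < high then PySem.Dict.get? pvVectorsA dir_label
      else pvLoopA angle2 rest
    else
      if angle2 ≥ low ∨ angle2 < high then PySem.Dict.get? pvVectorsA dir_label
      else pvLoopA angle2 rest

def angle_to_direction (theta_degrees : Int) : Option (Int × Int) :=
  let angle := PySem.Int.mod theta_degrees 360
  pvLoopA (2 * angle) pvBinsA

-- ===== PORT B =====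
def pvDirectionsB : List (Int × Int) :=
  [(1, 0), (1, 1), (0, 1), (-1, 1), (-1, 0), (-1, -1), (0, -1), (1, -1)]

def angle_to_direction_alt (theta_degrees : Int) : Option (Int × Int) :=
  let angle := PySem.Int.mod theta_degrees 360
  let idx := PySem.Int.mod (PySem.Int.floordiv (2 * angle + 45) 90) 8
  PySem.List.pyGet? pvDirectionsB idx

-- ===== PRECONDITION & SPEC =====
def Spec_angle_to_direction (theta_degrees : Int) (out : Option (Int × Int)) : Prop := out = angle_to_direction_alt theta_degrees
instance (theta_degrees : Int) (out : Option (Int × Int)) : Decidable (Spec_angle_to_direction theta_degrees out) := by unfold Spec_angle_to_direction; infer_instance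

-- ===== CLAIM (what is proved, stated in full; the proofs are below) =====
def Claim_equal_angle_to_direction : Prop := ∀ (theta_degrees : Int), Dom_angle_to_direction theta_degrees → Spec_angle_to_direction theta_degrees (angle_to_direction theta_degrees)

-- ===== LEMMAS AND PROOFS =====

-- both ports are functions of angle = theta % 360 only; check all 360 residues
set_option maxRecDepth 4000 in
theorem pv_body_eq_nat : ∀ n : Nat, n < 360 →
    pvLoopA (2 * (n : Int)) pvBinsA =
    PySem.List.pyGet? pvDirectionsB
      (PySem.Int.mod (PySem.Int.floordiv (2 * (n : Int) + 45) 90) 8) := by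
  decide

theorem angle_to_direction_spec : Claim_equal_angle_to_direction := by
  intro theta _
  unfold Spec_angle_to_direction angle_to_direction angle_to_direction_alt
  have h0 : 0 ≤ PySem.Int.mod theta 360 := PySem.Int.mod_nonneg theta (by norm_num)
  have h1 : PySem.Int.mod theta 360 < 360 := PySem.Int.mod_lt theta (by norm_num)
  have hcast : PySem.Int.mod theta 360 = ((PySem.Int.mod theta 360).toNat : Int) :=
    (Int.toNat_of_nonneg h0).symm
  have hn : (PySem.Int.mod theta 360).toNat < 360 := by omega
  show pvLoopA (2 * PySem.Int.mod theta 360) pvBinsA =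
    PySem.List.pyGet? pvDirectionsB
      (PySem.Int.mod (PySem.Int.floordiv (2 * PySem.Int.mod theta 360 + 45) 90) 8)
  rw [hcast]
  exact pv_body_eq_nat _ hn
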